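-- pv_equiv track=rewrite | github.com/zzbazzzbaz/judiciary-backend | judicial_system/utils/file_utils.py | validate_file_extension
-- ===== SOURCE A (Python) =====
-- from typing import Iterable
--
-- ALLOWED_EXTENSIONS: dict[str, list[str]] = {
--     "document": ["pdf", "doc", "docx", "xls", "xlsx", "ppt", "pptx", "txt"],
--     "image": ["jpg", "jpeg", "png", "gif", "webp"],
-- }
--
-- def validate_file_extension(extension: str, allowed_types: Iterable[str] | None = None) -> bool:
--     """验证文件扩展名是否允许。"""
--
--     extension = (extension or "").lower()
--     if not extension:
--         return False
--
--     types = list(allowed_types) if allowed_types else list(ALLOWED_EXTENSIONS.keys())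
--     allowed: set[str] = set()
--     for t in types:
--         allowed.update(ALLOWED_EXTENSIONS.get(t, []))
--
--     return extension in allowed
-- ===== SOURCE B (Python) =====
-- from typing import Iterable
--
-- ALLOWED_EXTENSIONS: dict[str, list[str]] = {
--     "document": ["pdf", "doc", "docx", "xls", "xlsx", "ppt", "pptx", "txt"],
--     "image": ["jpg", "jpeg", "png", "gif", "webp"],
-- }
--
-- # Inverted index built once at module load: extension -> set of types that allow it.
-- EXTENSION_OWNERS: dict[str, set[str]] = {}
-- for _t, _exts in ALLOWED_EXTENSIONS.items():
--     for _e in _exts: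
--         EXTENSION_OWNERS.setdefault(_e, set()).add(_t)
--
-- def validate_file_extension(extension: str, allowed_types: Iterable[str] | None = None) -> bool:
--     """Inverted-index lookup: find who owns the extension, then intersect with the request."""
--     extension = (extension or "").lower()
--     if not extension:
--         return False
--     owners = EXTENSION_OWNERS.get(extension)
--     if not owners:
--         return False
--     if not allowed_types:
--         return True  # default is all types; a known extension is owned by some type
--     return not owners.isdisjoint(allowed_types)
-- ===== Notes on version B (the rewrite author's own statement) =====
-- stated objective: faster
-- what changed: A scans forward over the requested types, unioning each type's extension list into a set and then testing membership once per call; B builds an inverted index (extension -> owning types) once at module load and answers each call with a single dict lookup followed by an intersection test against the requested types.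
import Mathlib
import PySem

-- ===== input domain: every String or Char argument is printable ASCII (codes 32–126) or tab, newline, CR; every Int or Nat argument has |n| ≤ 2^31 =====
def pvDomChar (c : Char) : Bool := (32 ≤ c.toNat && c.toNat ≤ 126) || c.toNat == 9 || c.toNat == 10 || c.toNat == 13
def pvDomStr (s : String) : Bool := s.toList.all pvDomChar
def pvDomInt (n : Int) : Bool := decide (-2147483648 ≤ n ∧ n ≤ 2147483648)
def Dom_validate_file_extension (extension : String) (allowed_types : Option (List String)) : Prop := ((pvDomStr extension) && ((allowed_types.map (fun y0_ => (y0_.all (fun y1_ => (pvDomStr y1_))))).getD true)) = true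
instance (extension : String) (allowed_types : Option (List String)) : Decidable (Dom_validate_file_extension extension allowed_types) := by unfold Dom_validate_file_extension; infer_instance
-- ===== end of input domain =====

-- B replaces A's per-call forward scan (union all requested types' lists, then one membership
-- test) by an inverted index built once at module level (extension -> owning types) and a
-- single lookup plus intersection test per call (objective: faster, measured).

-- ALLOWED_EXTENSIONS (module constant, shared by both Pythons)
def pvAllowedExtensions : PySem.Dict String (List String) :=
  PySem.Dict.mk
    [("document", ["pdf", "doc", "docx", "xls", "xlsx", "ppt", "pptx", "txt"]),
     ("image", ["jpg", "jpeg", "png", "gif", "webp"])]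

-- ===== PORT A =====
def validate_file_extension (extension : String) (allowed_types : Option (List String)) : Bool :=
  let e := PySem.Str.lower extension
  if e = "" then false
  else
    let types : List String :=
      match allowed_types with
      | some l => if l.isEmpty then pvAllowedExtensions.keys else l
      | none => pvAllowedExtensions.keys
    let allowed : PySem.Set String :=
      types.foldl (fun s t => PySem.Set.update s (pvAllowedExtensions.getD t [])) PySem.Set.empty
    PySem.Set.contains allowed e

-- ===== PORT B =====
-- EXTENSION_OWNERS: module-level inverted index, built by the nested loop in Source B
-- (setdefault(e, set()).add(t) is Dict.modify e Set.empty (·.add t)).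
def pvExtensionOwners : PySem.Dict String (PySem.Set String) :=
  pvAllowedExtensions.items.foldl
    (fun d p => p.2.foldl (fun d e => d.modify e PySem.Set.empty (fun s => PySem.Set.add s p.1)) d)
    PySem.Dict.empty

def validate_file_extension_alt (extension : String) (allowed_types : Option (List String)) : Bool :=
  let e := PySem.Str.lower extension
  if e = "" then false
  else
    match pvExtensionOwners.get? e with
    | none => false
    | some owners =>
      if owners.isEmpty then false
      else
        match allowed_types with
        | none => true
        | some l => if l.isEmpty then true else !(PySem.Set.isdisjoint owners l)

-- ===== PRECONDITION & SPEC =====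
def Spec_validate_file_extension (extension : String) (allowed_types : Option (List String)) (out : Bool) : Prop := out = validate_file_extension_alt extension allowed_types
instance (extension : String) (allowed_types : Option (List String)) (out : Bool) : Decidable (Spec_validate_file_extension extension allowed_types out) := by unfold Spec_validate_file_extension; infer_instance

-- ===== CLAIM (what is proved, stated in full; the proofs are below) =====
def Claim_equal_validate_file_extension : Prop := ∀ (extension : String) (allowed_types : Option (List String)), Dom_validate_file_extension extension allowed_types → Spec_validate_file_extension extension allowed_types (validate_file_extension extension allowed_types)

-- ===== LEMMAS AND PROOFS =====

-- the inverted index, evaluated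
theorem pvExtensionOwners_eval :
    pvExtensionOwners = PySem.Dict.mk
      [("pdf", ["document"]), ("doc", ["document"]), ("docx", ["document"]),
       ("xls", ["document"]), ("xlsx", ["document"]), ("ppt", ["document"]),
       ("pptx", ["document"]), ("txt", ["document"]), ("jpg", ["image"]),
       ("jpeg", ["image"]), ("png", ["image"]), ("gif", ["image"]),
       ("webp", ["image"])] := by decide

-- index lookup on a document extension
theorem pv_get_doc (e : String)
    (h : e ∈ (["pdf", "doc", "docx", "xls", "xlsx", "ppt", "pptx", "txt"] : List String)) :
    pvExtensionOwners.get? e = some ["document"] := by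
  rw [pvExtensionOwners_eval]
  simp only [List.mem_cons, List.not_mem_nil, or_false] at h
  rcases h with rfl|rfl|rfl|rfl|rfl|rfl|rfl|rfl <;> decide

-- index lookup on an image extension
theorem pv_get_img (e : String)
    (h : e ∈ (["jpg", "jpeg", "png", "gif", "webp"] : List String)) :
    pvExtensionOwners.get? e = some ["image"] := by
  rw [pvExtensionOwners_eval]
  simp only [List.mem_cons, List.not_mem_nil, or_false] at h
  rcases h with rfl|rfl|rfl|rfl|rfl <;> decide

-- index lookup on an unknown extension
theorem pv_get_none (e : String)
    (h1 : e ∉ (["pdf", "doc", "docx", "xls", "xlsx", "ppt", "pptx", "txt"] : List String))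
    (h2 : e ∉ (["jpg", "jpeg", "png", "gif", "webp"] : List String)) :
    pvExtensionOwners.get? e = none := by
  rw [pvExtensionOwners_eval, PySem.Dict.get?_eq_none_iff_not_mem_keys]
  simp only [PySem.Dict.keys_mk, List.map_cons, List.map_nil, List.mem_cons,
    List.not_mem_nil, or_false]
  simp only [List.mem_cons, List.not_mem_nil, or_false, not_or] at h1 h2
  tauto

-- the index is correct: t's list contains e  iff  e's owners contain t
theorem pv_owners_correct (e t : String) :
    (pvAllowedExtensions.getD t []).contains e
      = ((pvExtensionOwners.get? e).getD PySem.Set.empty).contains t := by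
  by_cases hdoc : e ∈ (["pdf", "doc", "docx", "xls", "xlsx", "ppt", "pptx", "txt"] : List String)
  · have hni : e ∉ (["jpg", "jpeg", "png", "gif", "webp"] : List String) := by
      intro h; have := pv_get_img e h; rw [pv_get_doc e hdoc] at this; simp at this
    rw [pv_get_doc e hdoc]
    by_cases h1 : t = "document"
    · subst h1
      simp [pvAllowedExtensions, PySem.Dict.getD_eq_get?_getD, PySem.Dict.get?_mk_cons,
        List.contains_eq_mem, hdoc]
    · by_cases h2 : t = "image"
      · subst h2
        simp [pvAllowedExtensions, PySem.Dict.getD_eq_get?_getD, PySem.Dict.get?_mk_cons,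
          List.contains_eq_mem, hni]
      · simp [pvAllowedExtensions, PySem.Dict.getD_eq_get?_getD, PySem.Dict.get?,
          List.contains_eq_mem, Ne.symm h1, Ne.symm h2, h1]
  · by_cases himg : e ∈ (["jpg", "jpeg", "png", "gif", "webp"] : List String)
    · rw [pv_get_img e himg]
      by_cases h1 : t = "document"
      · subst h1
        simp [pvAllowedExtensions, PySem.Dict.getD_eq_get?_getD, PySem.Dict.get?_mk_cons,
          List.contains_eq_mem, hdoc]
      · by_cases h2 : t = "image"
        · subst h2
          simp [pvAllowedExtensions, PySem.Dict.getD_eq_get?_getD, PySem.Dict.get?_mk_cons,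
            List.contains_eq_mem, himg]
        · simp [pvAllowedExtensions, PySem.Dict.getD_eq_get?_getD, PySem.Dict.get?,
            List.contains_eq_mem, Ne.symm h1, Ne.symm h2, h2]
    · rw [pv_get_none e hdoc himg]
      simp only [pvAllowedExtensions, PySem.Dict.getD_eq_get?_getD, PySem.Dict.get?,
        Option.getD_none]
      by_cases h1 : "document" = t
      · subst h1; simp_all [List.contains_eq_mem, PySem.Set.empty, not_or]
      · by_cases h2 : "image" = t
        · subst h2; simp_all [List.contains_eq_mem, PySem.Set.empty, not_or]
        · simp [h1, h2, List.contains_eq_mem, PySem.Set.empty]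

-- A's union-building loop characterised as an any-scan
theorem pv_contains_foldl_update (e : String) :
    ∀ (ts : List String) (acc : PySem.Set String),
      PySem.Set.contains
        (ts.foldl (fun s t => PySem.Set.update s (pvAllowedExtensions.getD t [])) acc) e
      = (PySem.Set.contains acc e || ts.any (fun t => (pvAllowedExtensions.getD t []).contains e)) := by
  intro ts
  induction ts with
  | nil => intro acc; simp
  | cons x xs ih =>
    intro acc
    simp only [List.foldl_cons, List.any_cons]
    rw [ih]
    have h : PySem.Set.contains (PySem.Set.update acc (pvAllowedExtensions.getD x [])) e
        = (PySem.Set.contains acc e || (pvAllowedExtensions.getD x []).contains e) := by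
      simp [PySem.Set.contains_eq_listContains, List.contains_eq_mem, PySem.Set.mem_update]
    rw [h, Bool.or_assoc]

-- A's scan over any type list equals a scan over e's owners
theorem pv_any_eq (e : String) (l : List String) :
    (l.any fun t => (pvAllowedExtensions.getD t []).contains e)
      = ((pvExtensionOwners.get? e).getD PySem.Set.empty).any (fun t => l.contains t) := by
  rw [Bool.eq_iff_iff]
  simp only [List.any_eq_true]
  constructor
  · rintro ⟨t, htl, hc⟩
    rw [pv_owners_correct] at hc
    exact ⟨t, by simpa [List.contains_eq_mem] using hc, by simpa [List.contains_eq_mem] using htl⟩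
  · rintro ⟨t, hto, hc⟩
    refine ⟨t, by simpa [List.contains_eq_mem] using hc, ?_⟩
    rw [pv_owners_correct]
    simpa [List.contains_eq_mem] using hto

-- the stored owners set is ["document"] or ["image"]
theorem pv_owners_shape (e : String) (os : PySem.Set String)
    (hg : pvExtensionOwners.get? e = some os) : os = ["document"] ∨ os = ["image"] := by
  by_cases hdoc : e ∈ (["pdf", "doc", "docx", "xls", "xlsx", "ppt", "pptx", "txt"] : List String)
  · left; have h := pv_get_doc e hdoc; rw [hg] at h; exact (Option.some.inj h)
  · by_cases himg : e ∈ (["jpg", "jpeg", "png", "gif", "webp"] : List String)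
    · right; have h := pv_get_img e himg; rw [hg] at h; exact (Option.some.inj h)
    · have h := pv_get_none e hdoc himg; rw [hg] at h; cases h

-- ===== VERDICT (by name: the statement is the Claim_ definition above) =====
theorem validate_file_extension_spec : Claim_equal_validate_file_extension := by
  intro extension allowed_types _
  unfold Spec_validate_file_extension validate_file_extension validate_file_extension_alt
  by_cases he : PySem.Str.lower extension = ""
  · simp [he]
  · simp only [he, if_false]
    have core : ∀ l : List String,
        PySem.Set.contains
          (l.foldl (fun s t => PySem.Set.update s (pvAllowedExtensions.getD t [])) PySem.Set.empty)
          (PySem.Str.lower extension)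
        = ((pvExtensionOwners.get? (PySem.Str.lower extension)).getD PySem.Set.empty).any
            (fun t => l.contains t) := by
      intro l
      rw [pv_contains_foldl_update, pv_any_eq]
      simp [PySem.Set.contains, PySem.Set.empty]
    cases allowed_types with
    | none =>
      rw [core pvAllowedExtensions.keys]
      cases hg : pvExtensionOwners.get? (PySem.Str.lower extension) with
      | none => simp [PySem.Set.empty]
      | some os =>
        rcases pv_owners_shape _ os hg with rfl | rfl <;>
          simp [pvAllowedExtensions, PySem.Dict.keys, List.contains_eq_mem]
    | some l =>
      by_cases hl : l.isEmpty
      · simp only [hl, if_true]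
        rw [core pvAllowedExtensions.keys]
        cases hg : pvExtensionOwners.get? (PySem.Str.lower extension) with
        | none => simp [PySem.Set.empty]
        | some os =>
          rcases pv_owners_shape _ os hg with rfl | rfl <;>
            simp [pvAllowedExtensions, PySem.Dict.keys, List.contains_eq_mem]
      · simp only [hl, if_false, Bool.false_eq_true]
        rw [core l]
        cases hg : pvExtensionOwners.get? (PySem.Str.lower extension) with
        | none => simp [PySem.Set.empty]
        | some os =>
          rcases pv_owners_shape _ os hg with rfl | rfl <;>
            simp [PySem.Set.isdisjoint, List.contains_eq_mem]
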